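-- pv_equiv track=rewrite | github.com/dobssi/Fitness-Data | intervals_audit.py | analyse_activities
-- ===== SOURCE A (Python) =====
-- from collections import defaultdict
--
-- def analyse_activities(activities):
--     """Count activities by year and sport type."""
--     by_year_sport = defaultdict(lambda: defaultdict(int))
--     by_year_total = defaultdict(int)
--     all_sports = set()
--     dates = []
--
--     for act in activities:
--         date_str = act.get("start_date_local", "")[:10]
--         sport = act.get("type", "Unknown")
--         if not date_str:
--             continue
--         year = date_str[:4]
--         by_year_sport[year][sport] += 1
--         by_year_total[year] += 1
--         all_sports.add(sport)
--         dates.append(date_str)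
--
--     return by_year_sport, by_year_total, sorted(all_sports), sorted(dates)
-- ===== SOURCE B (Python) =====
-- from collections import defaultdict
--
-- def analyse_activities(activities):
--     """Count activities by year and sport type."""
--     # One comprehension extracts the valid (year, sport, date) rows; each
--     # result is then aggregated independently from that row list.
--     rows = [(d[:4], act.get("type", "Unknown"), d)
--             for act in activities
--             for d in [act.get("start_date_local", "")[:10]]
--             if d]
--     by_year_sport = defaultdict(lambda: defaultdict(int))
--     for year, sport, _ in rows:
--         by_year_sport[year][sport] += 1
--     by_year_total = defaultdict(int)
--     for year, _, _ in rows: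
--         by_year_total[year] += 1
--     return (by_year_sport, by_year_total,
--             sorted({sport for _, sport, _ in rows}),
--             sorted(d for _, _, d in rows))
-- ===== Notes on version B (the rewrite author's own statement) =====
-- stated objective: simpler
-- what changed: A's single fused loop maintaining four accumulators (two defaultdicts, a set, a list) is replaced by one comprehension extracting the valid (year, sport, date) rows and four independent aggregations derived from that row list.
import Mathlib
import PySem

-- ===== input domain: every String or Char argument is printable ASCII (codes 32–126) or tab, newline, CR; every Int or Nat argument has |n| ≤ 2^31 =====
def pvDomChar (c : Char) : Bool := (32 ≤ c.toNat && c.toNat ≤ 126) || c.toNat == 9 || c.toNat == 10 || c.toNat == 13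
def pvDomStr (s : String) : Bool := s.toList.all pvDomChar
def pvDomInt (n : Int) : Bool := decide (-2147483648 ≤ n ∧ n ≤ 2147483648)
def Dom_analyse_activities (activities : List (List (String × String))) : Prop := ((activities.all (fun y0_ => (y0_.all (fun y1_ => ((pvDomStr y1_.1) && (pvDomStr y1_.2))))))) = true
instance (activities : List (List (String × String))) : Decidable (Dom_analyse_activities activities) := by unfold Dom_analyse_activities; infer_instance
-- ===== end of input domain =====

-- B replaces A's single fused loop by a comprehension extracting the valid (year, sport, date)
-- rows followed by independent aggregations of that row list (objective: simpler decomposition).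


-- ===== PORT A =====
-- A's loop state: (by_year_sport, by_year_total, all_sports, dates)
def stepA (st : PySem.Dict String (PySem.Dict String Int) × PySem.Dict String Int × PySem.Set String × List String)
    (act : List (String × String)) :
    PySem.Dict String (PySem.Dict String Int) × PySem.Dict String Int × PySem.Set String × List String :=
  let date_str := PySem.Str.slice ((act.lookup "start_date_local").getD "") none (some 10)
  let sport := (act.lookup "type").getD "Unknown"
  if date_str = "" then st
  else
    let year := PySem.Str.slice date_str none (some 4)
    (st.1.modify year PySem.Dict.empty (fun inner => inner.modify sport 0 (· + 1)),
     st.2.1.modify year 0 (· + 1),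
     st.2.2.1.add sport,
     st.2.2.2 ++ [date_str])

def analyse_activities (activities : List (List (String × String))) : (List (String × List (String × Int))) × (List (String × Int)) × List String × List String :=
  let st := activities.foldl stepA (PySem.Dict.empty, PySem.Dict.empty, ([] : PySem.Set String), ([] : List String))
  (st.1.items.map (fun p => (p.1, p.2.items)),
   st.2.1.items,
   PySem.List.sorted st.2.2.1 (fun x => x) false,
   PySem.List.sorted st.2.2.2 (fun x => x) false)

-- ===== PORT B =====
-- the comprehension's per-activity row: some (year, sport, date) for a valid date, none otherwise
def rowB (act : List (String × String)) : Option (String × String × String) :=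
  let d := PySem.Str.slice ((act.lookup "start_date_local").getD "") none (some 10)
  if d = "" then none
  else some (PySem.Str.slice d none (some 4), (act.lookup "type").getD "Unknown", d)

def analyse_activities_alt (activities : List (List (String × String))) : (List (String × List (String × Int))) × (List (String × Int)) × List String × List String :=
  let rows := activities.filterMap rowB
  let by_year_sport := rows.foldl
    (fun bys r => bys.modify r.1 PySem.Dict.empty (fun inner => inner.modify r.2.1 0 (· + 1)))
    PySem.Dict.empty
  let by_year_total := rows.foldl (fun byt r => byt.modify r.1 0 (· + 1)) PySem.Dict.empty
  (by_year_sport.items.map (fun p => (p.1, p.2.items)),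
   by_year_total.items,
   PySem.List.sorted (PySem.Set.ofList (rows.map (fun r => r.2.1))) (fun x => x) false,
   PySem.List.sorted (rows.map (fun r => r.2.2)) (fun x => x) false)

-- ===== PRECONDITION & SPEC =====
def Spec_analyse_activities (activities : List (List (String × String))) (out : (List (String × List (String × Int))) × (List (String × Int)) × List String × List String) : Prop := out = analyse_activities_alt activities
instance (activities : List (List (String × String))) (out : (List (String × List (String × Int))) × (List (String × Int)) × List String × List String) : Decidable (Spec_analyse_activities activities out) := by unfold Spec_analyse_activities; infer_instance

-- ===== CLAIM (what is proved, stated in full; the proofs are below) =====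
def Claim_equal_analyse_activities : Prop := ∀ (activities : List (List (String × String))), Dom_analyse_activities activities → Spec_analyse_activities activities (analyse_activities activities)

-- ===== LEMMAS AND PROOFS =====

-- A's fused fold, started at any state, equals B's independent aggregations of the row list.
lemma loopA_eq (acts : List (List (String × String)))
    (bys : PySem.Dict String (PySem.Dict String Int)) (byt : PySem.Dict String Int)
    (sports : PySem.Set String) (dates : List String) :
    acts.foldl stepA (bys, byt, sports, dates) =
      ((acts.filterMap rowB).foldl
         (fun bys r => bys.modify r.1 PySem.Dict.empty (fun inner => inner.modify r.2.1 0 (· + 1))) bys,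
       (acts.filterMap rowB).foldl (fun byt r => byt.modify r.1 0 (· + 1)) byt,
       (acts.filterMap rowB).foldl (fun s r => s.add r.2.1) sports,
       dates ++ (acts.filterMap rowB).map (fun r => r.2.2)) := by
  induction acts generalizing bys byt sports dates with
  | nil => simp
  | cons act rest ih =>
    by_cases h : PySem.Str.slice ((act.lookup "start_date_local").getD "") none (some 10) = ""
    · simp [stepA, rowB, h, ih]
    · simp [stepA, rowB, h, ih]

-- the Set built by A's repeated .add is PySem.Set.ofList of the sports column
lemma foldl_add_eq_ofList (rows : List (String × String × String)) :
    rows.foldl (fun s r => PySem.Set.add s r.2.1) ([] : PySem.Set String)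
      = PySem.Set.ofList (rows.map (fun r => r.2.1)) := by
  simp [PySem.Set.ofList, List.foldl_map]

-- ===== VERDICT (by name: the statement is the Claim_ definition above) =====
theorem analyse_activities_spec : Claim_equal_analyse_activities := by
  intro activities _
  show _ = _
  simp only [analyse_activities, analyse_activities_alt, loopA_eq, foldl_add_eq_ofList,
    List.nil_append]
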